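-- pv_equiv track=rewrite | github.com/Lemirq/uberglobalhackathon | backend/utilities.py | find_path_size
-- ===== SOURCE A (Python) =====
-- def find_path_size(grid):
--     # Check if the grid is empty
--     if not grid:
--         return 0
--
--     def dfs(row, col):
--         # Check if we are out of bounds or if the cell is not part of the path
--         if row < 0 or row >= len(grid) or col < 0 or col >= len(grid[0]) or grid[row][col] == 0:
--             return 0
--
--         # Mark the current cell as visited (set it to 0)
--         grid[row][col] = 0
--
--         # Explore adjacent cells
--         count = 1
--         count += dfs(row + 1, col)  # Explore down
--         count += dfs(row - 1, col)  # Explore up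
--         count += dfs(row, col + 1)  # Explore right
--         count += dfs(row, col - 1)  # Explore left
--         count += dfs(row + 1, col + 1)  # Explore diagonal down-right
--         count += dfs(row - 1, col + 1)  # Explore diagonal up-right
--         count += dfs(row + 1, col - 1)  # Explore diagonal down-left
--         count += dfs(row - 1, col - 1)  # Explore diagonal up-left
--         return count
--
--     connected_ones_count = 0
--
--     # Iterate through the grid and find connected ones
--     for row in range(len(grid)):
--         for col in range(len(grid[0])):
--             if grid[row][col] == 1:
--                 connected_ones_count += dfs(row, col)
--
--     # Return the total size of connected ones
--     return connected_ones_count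
-- ===== SOURCE B (Python) =====
-- def find_path_size(grid):
--     # Iterative flood fill: same double scan and seed test as before, but the
--     # recursive dfs is replaced by an explicit LIFO stack (no recursion depth limit).
--     if not grid:
--         return 0
--     rows = len(grid)
--     cols = len(grid[0])
--     count = 0
--     for row in range(rows):
--         for col in range(cols):
--             if grid[row][col] == 1:
--                 stack = [(row, col)]
--                 while stack:
--                     r, c = stack.pop()
--                     if r < 0 or r >= rows or c < 0 or c >= cols or grid[r][c] == 0:
--                         continue
--                     grid[r][c] = 0
--                     count += 1
--                     stack.extend([(r - 1, c - 1), (r + 1, c - 1),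
--                                   (r - 1, c + 1), (r + 1, c + 1),
--                                   (r, c - 1), (r, c + 1),
--                                   (r - 1, c), (r + 1, c)])
--     return count
-- ===== Notes on version B (the rewrite author's own statement) =====
-- stated objective: alternative
-- what changed: The recursive 8-neighbour dfs (which mutates the grid and can hit Python's recursion limit) is replaced by an explicit LIFO stack with bounds/zero checks done at pop time; the outer double scan and seed test are kept.
import Mathlib
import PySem

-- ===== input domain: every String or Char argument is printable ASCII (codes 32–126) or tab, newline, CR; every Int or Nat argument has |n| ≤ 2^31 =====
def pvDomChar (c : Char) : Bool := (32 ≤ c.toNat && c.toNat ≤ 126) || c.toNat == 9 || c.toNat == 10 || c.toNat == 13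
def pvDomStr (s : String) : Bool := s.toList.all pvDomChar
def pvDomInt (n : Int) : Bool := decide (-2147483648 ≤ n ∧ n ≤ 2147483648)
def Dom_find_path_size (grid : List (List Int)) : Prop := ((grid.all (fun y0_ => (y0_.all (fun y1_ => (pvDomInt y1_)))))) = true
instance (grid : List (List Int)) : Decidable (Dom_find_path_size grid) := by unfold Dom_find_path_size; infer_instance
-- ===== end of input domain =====

-- B replaces the recursive 8-neighbour dfs by an explicit LIFO stack (checks at pop time);
-- same double scan, same seed test, same count. Both A and B zero visited cells of the
-- caller's grid in place; the equivalence proved here is about the RETURN value.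


-- ===== PORT A =====
-- Shared cell access/update. Indices are read only after the explicit `0 ≤ r/c < len`
-- checks of the Python (pvStop), so `.toNat` is exact there; the getD default 0 is never
-- observed inside Pre_ (rows are at least as long as row 0 there).
def pvCell (g : List (List Int)) (r c : Int) : Int := (g.getD r.toNat []).getD c.toNat 0

def pvSet0 (g : List (List Int)) (r c : Int) : List (List Int) :=
  g.set r.toNat ((g.getD r.toNat []).set c.toNat 0)

-- `row < 0 or row >= len(grid) or col < 0 or col >= len(grid[0]) or grid[row][col] == 0`
def pvStop (g : List (List Int)) (r c : Int) : Bool :=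
  decide (r < 0) || decide ((g.length : Int) ≤ r) || decide (c < 0) ||
    decide (((g.headD []).length : Int) ≤ c) || decide (pvCell g r c = 0)

-- number of nonzero cells: the fuel/termination measure (a call that recurses first zeroes a cell)
def pvNz (g : List (List Int)) : Nat :=
  (g.map (fun row => (row.filter (fun x => x != 0)).length)).sum

-- literal port of A's dfs; fuel is a totality guard only (each recursive call is made
-- after a nonzero cell was set to 0, so fuel pvNz g + 1 never runs out)
def dfsA : Nat → List (List Int) → Int → Int → Int × List (List Int)
  | 0, g, _, _ => (0, g)
  | f + 1, g, r, c =>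
    if pvStop g r c then (0, g)
    else
      let g0 := pvSet0 g r c
      let p1 := dfsA f g0 (r + 1) c
      let p2 := dfsA f p1.2 (r - 1) c
      let p3 := dfsA f p2.2 r (c + 1)
      let p4 := dfsA f p3.2 r (c - 1)
      let p5 := dfsA f p4.2 (r + 1) (c + 1)
      let p6 := dfsA f p5.2 (r - 1) (c + 1)
      let p7 := dfsA f p6.2 (r + 1) (c - 1)
      let p8 := dfsA f p7.2 (r - 1) (c - 1)
      (1 + p1.1 + p2.1 + p3.1 + p4.1 + p5.1 + p6.1 + p7.1 + p8.1, p8.2)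

def find_path_size (grid : List (List Int)) : Int :=
  if grid = [] then 0
  else
    ((List.range grid.length).foldl (fun st rn =>
      (List.range (grid.headD []).length).foldl (fun (st : Int × List (List Int)) cn =>
        if pvCell st.2 (rn : Int) (cn : Int) = 1 then
          let p := dfsA (pvNz st.2 + 1) st.2 (rn : Int) (cn : Int)
          (st.1 + p.1, p.2)
        else st) st) ((0 : Int), grid)).1

-- ===== PORT B =====
-- termination lemma for the stack loop (cited by decreasing_by): zeroing a nonzero cell
-- drops the nonzero count by exactly one
theorem pvFiltSet (row : List Int) (cn : Nat) (h : row.getD cn 0 ≠ 0) :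
    ((row.set cn 0).filter (fun x => x != 0)).length + 1 =
      (row.filter (fun x => x != 0)).length := by
  induction row generalizing cn with
  | nil => simp at h
  | cons x xs ih =>
    cases cn with
    | zero =>
      simp only [List.getD_cons_zero] at h
      simp [List.set_cons_zero, h]
    | succ n =>
      simp only [List.getD_cons_succ] at h
      have := ih n h
      simp only [List.set_cons_succ, List.filter_cons]
      by_cases hx : (x != 0) = true <;> simp [hx] <;> omega

theorem pvNz_set0 (g : List (List Int)) (r c : Int) (h : pvCell g r c ≠ 0) :
    pvNz (pvSet0 g r c) + 1 = pvNz g := by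
  unfold pvCell at h
  unfold pvSet0 pvNz
  generalize r.toNat = rn at *
  induction g generalizing rn with
  | nil => simp [List.getD] at h
  | cons row gs ih =>
    cases rn with
    | zero =>
      simp only [List.getD_cons_zero] at h
      simp only [List.getD_cons_zero, List.set_cons_zero, List.map_cons, List.sum_cons]
      have := pvFiltSet row c.toNat h
      omega
    | succ n =>
      simp only [List.getD_cons_succ] at h
      simp only [List.getD_cons_succ, List.set_cons_succ, List.map_cons, List.sum_cons]
      have := ih n h
      omega

theorem pvNz_set0_lt (g : List (List Int)) (r c : Int) (h : pvCell g r c ≠ 0) :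
    pvNz (pvSet0 g r c) < pvNz g := by
  have := pvNz_set0 g r c h; omega

-- literal port of B's while-loop over the explicit stack (head of the list = top of the
-- stack, so the cons order here is the reverse of Source B's `extend` order)
def loopB (g : List (List Int)) (stack : List (Int × Int)) (cnt : Int) :
    Int × List (List Int) :=
  match stack with
  | [] => (cnt, g)
  | (r, c) :: rest =>
    if h : pvStop g r c then loopB g rest cnt
    else
      loopB (pvSet0 g r c)
        ((r + 1, c) :: (r - 1, c) :: (r, c + 1) :: (r, c - 1) ::
         (r + 1, c + 1) :: (r - 1, c + 1) :: (r + 1, c - 1) :: (r - 1, c - 1) :: rest)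
        (cnt + 1)
termination_by stack.length + 9 * pvNz g
decreasing_by
  · simp only [List.length_cons]; omega
  · have hc : pvCell g r c ≠ 0 := by
      simp only [pvStop, Bool.or_eq_true, decide_eq_true_eq] at h
      tauto
    have := pvNz_set0_lt g r c hc
    simp only [List.length_cons]; omega

def find_path_size_alt (grid : List (List Int)) : Int :=
  if grid = [] then 0
  else
    ((List.range grid.length).foldl (fun st rn =>
      (List.range (grid.headD []).length).foldl (fun (st : Int × List (List Int)) cn =>
        if pvCell st.2 (rn : Int) (cn : Int) = 1 then
          loopB st.2 [((rn : Int), (cn : Int))] st.1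
        else st) st) ((0 : Int), grid)).1

-- ===== PRECONDITION & SPEC =====
-- Pre_ excludes ragged grids in which some row is shorter than row 0 (while row 0 is
-- nonempty): on exactly those inputs the Python A raises IndexError.
def Pre_find_path_size (grid : List (List Int)) : Prop :=
  (grid.headD []).length = 0 ∨ ∀ row ∈ grid, (grid.headD []).length ≤ row.length
instance (grid : List (List Int)) : Decidable (Pre_find_path_size grid) := by
  unfold Pre_find_path_size; infer_instance

def pvWitness_find_path_size : List (List Int) := [[1, 0, 1], [0, 1, 1]]

def Spec_find_path_size (grid : List (List Int)) (out : Int) : Prop := out = find_path_size_alt grid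
instance (grid : List (List Int)) (out : Int) : Decidable (Spec_find_path_size grid out) := by unfold Spec_find_path_size; infer_instance

-- ===== CLAIM (what is proved, stated in full; the proofs are below) =====
def Claim_equal_find_path_size : Prop := ∀ (grid : List (List Int)), Dom_find_path_size grid → Pre_find_path_size grid → Spec_find_path_size grid (find_path_size grid)

-- ===== LEMMAS AND PROOFS =====

theorem pvNz_dfsA_le (f : Nat) : ∀ (g : List (List Int)) (r c : Int),
    pvNz (dfsA f g r c).2 ≤ pvNz g := by
  induction f with
  | zero => intro g r c; simp [dfsA]
  | succ f ih =>
    intro g r c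
    rw [dfsA]
    by_cases hs : pvStop g r c
    · simp [hs]
    · simp only [if_neg hs]
      have hc : pvCell g r c ≠ 0 := by
        simp only [pvStop, Bool.or_eq_true, decide_eq_true_eq] at hs
        tauto
      have h0 : pvNz (pvSet0 g r c) ≤ pvNz g := le_of_lt (pvNz_set0_lt g r c hc)
      calc pvNz (dfsA f (dfsA f (dfsA f (dfsA f (dfsA f (dfsA f (dfsA f (dfsA f (pvSet0 g r c) (r+1) c).2 (r-1) c).2 r (c+1)).2 r (c-1)).2 (r+1) (c+1)).2 (r-1) (c+1)).2 (r+1) (c-1)).2 (r-1) (c-1)).2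
          ≤ pvNz (pvSet0 g r c) := by
            exact le_trans (ih _ _ _) (le_trans (ih _ _ _) (le_trans (ih _ _ _)
              (le_trans (ih _ _ _) (le_trans (ih _ _ _) (le_trans (ih _ _ _)
              (le_trans (ih _ _ _) (ih _ _ _)))))))
        _ ≤ pvNz g := h0

theorem loopB_dfsA (f : Nat) : ∀ (g : List (List Int)) (r c : Int) (s : List (Int × Int)) (cnt : Int),
    pvNz g < f →
    loopB g ((r, c) :: s) cnt = loopB (dfsA f g r c).2 s (cnt + (dfsA f g r c).1) := by
  induction f with
  | zero => intro g r c s cnt h; omega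
  | succ f ih =>
    intro g r c s cnt h
    rw [loopB, dfsA]
    by_cases hs : pvStop g r c
    · simp [hs]
    · simp only [if_neg hs, dif_neg hs]
      have hc : pvCell g r c ≠ 0 := by
        simp only [pvStop, Bool.or_eq_true, decide_eq_true_eq] at hs
        tauto
      have h0 : pvNz (pvSet0 g r c) + 1 = pvNz g := pvNz_set0 g r c hc
      have hb1 : pvNz (pvSet0 g r c) < f := by omega
      set g0 := pvSet0 g r c with hg0
      set q1 := dfsA f g0 (r + 1) c with hq1
      set q2 := dfsA f q1.2 (r - 1) c with hq2
      set q3 := dfsA f q2.2 r (c + 1) with hq3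
      set q4 := dfsA f q3.2 r (c - 1) with hq4
      set q5 := dfsA f q4.2 (r + 1) (c + 1) with hq5
      set q6 := dfsA f q5.2 (r - 1) (c + 1) with hq6
      set q7 := dfsA f q6.2 (r + 1) (c - 1) with hq7
      set q8 := dfsA f q7.2 (r - 1) (c - 1) with hq8
      have hb2 : pvNz q1.2 < f := lt_of_le_of_lt (by rw [hq1]; exact pvNz_dfsA_le f _ _ _) hb1
      have hb3 : pvNz q2.2 < f := lt_of_le_of_lt (by rw [hq2]; exact pvNz_dfsA_le f _ _ _) hb2
      have hb4 : pvNz q3.2 < f := lt_of_le_of_lt (by rw [hq3]; exact pvNz_dfsA_le f _ _ _) hb3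
      have hb5 : pvNz q4.2 < f := lt_of_le_of_lt (by rw [hq4]; exact pvNz_dfsA_le f _ _ _) hb4
      have hb6 : pvNz q5.2 < f := lt_of_le_of_lt (by rw [hq5]; exact pvNz_dfsA_le f _ _ _) hb5
      have hb7 : pvNz q6.2 < f := lt_of_le_of_lt (by rw [hq6]; exact pvNz_dfsA_le f _ _ _) hb6
      have hb8 : pvNz q7.2 < f := lt_of_le_of_lt (by rw [hq7]; exact pvNz_dfsA_le f _ _ _) hb7
      rw [ih g0 (r + 1) c _ _ hb1, ← hq1,
          ih q1.2 (r - 1) c _ _ hb2, ← hq2,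
          ih q2.2 r (c + 1) _ _ hb3, ← hq3,
          ih q3.2 r (c - 1) _ _ hb4, ← hq4,
          ih q4.2 (r + 1) (c + 1) _ _ hb5, ← hq5,
          ih q5.2 (r - 1) (c + 1) _ _ hb6, ← hq6,
          ih q6.2 (r + 1) (c - 1) _ _ hb7, ← hq7,
          ih q7.2 (r - 1) (c - 1) _ _ hb8, ← hq8]
      congr 1
      ring

theorem step_eq (st : Int × List (List Int)) (r c : Int) :
    (if pvCell st.2 r c = 1 then
       let p := dfsA (pvNz st.2 + 1) st.2 r c
       (st.1 + p.1, p.2)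
     else st)
    = (if pvCell st.2 r c = 1 then loopB st.2 [(r, c)] st.1 else st) := by
  by_cases h : pvCell st.2 r c = 1
  · simp only [if_pos h]
    rw [loopB_dfsA (pvNz st.2 + 1) st.2 r c [] st.1 (by omega), loopB]
  · simp [h]

-- ===== VERDICT (by name: the statement is the Claim_ definition above) =====
theorem find_path_size_spec : Claim_equal_find_path_size := by
  intro grid _ _
  show find_path_size grid = find_path_size_alt grid
  unfold find_path_size find_path_size_alt
  by_cases hg : grid = []
  · rw [if_pos hg, if_pos hg]
  · rw [if_neg hg, if_neg hg]
    congr 1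
    apply List.foldl_ext
    intro st rn _
    apply List.foldl_ext
    intro st' cn _
    exact step_eq st' (rn : Int) (cn : Int)
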